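-- pv_equiv track=rewrite | github.com/Mahdavi78/MoleculeNet | Preprocess/utils.py | sort_tokens
-- ===== SOURCE A (Python) =====
-- from typing import List, Dict, Union, Optional, Tuple, Type, Set
--
-- def sort_tokens(tokens: List[str]) -> List[str]:
--     """
--     Sort tokens in specific order:
--     1. 'SOS'
--     2. Alphabets (A-Z)
--     3. Non-numeric special characters
--     4. Numbers (0-9)
--     5. 'EOS'
--     6. 'PAD'
--     """
--     # First ensure all special tokens are in the list
--     all_tokens = set(tokens)  # Convert to set to remove duplicates
--
--     # Separate tokens into categories
--     special_tokens = []
--     if '<SOS>' in all_tokens: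
--         special_tokens.append('<SOS>')
--     if '<EOS>' in all_tokens:
--         special_tokens.append('<EOS>')
--     if '<PAD>' in all_tokens:
--         special_tokens.append('<PAD>')
--
--     # Get remaining tokens (excluding special tokens)
--     remaining = [t for t in all_tokens if t not in ['<PAD>', '<SOS>', '<EOS>']]
--
--     # Separate into alphabets, special chars, and numbers
--     alphabets = sorted([t for t in remaining if t.isalpha()])
--     special_chars = sorted([t for t in remaining if not t.isalnum()])
--     numbers = sorted([t for t in remaining if t.isdigit()])
--
--     # Combine in specified order: SOS, alphabets, special chars, numbers, EOS, PAD
--     return special_tokens[:1] + alphabets + special_chars + numbers + special_tokens[1:2] + special_tokens[2:]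
-- ===== SOURCE B (Python) =====
-- def sort_tokens(tokens):
--     """Same categorised order via one global sort plus a single bucketing pass."""
--     seen = set(tokens)
--     sos = ['<SOS>'] if '<SOS>' in seen else []
--     eos = ['<EOS>'] if '<EOS>' in seen else []
--     pad = ['<PAD>'] if '<PAD>' in seen else []
--     alphabets, special_chars, numbers = [], [], []
--     for t in sorted(seen - {'<SOS>', '<EOS>', '<PAD>'}):
--         if t.isalpha():
--             alphabets.append(t)
--         elif not t.isalnum():
--             special_chars.append(t)
--         elif t.isdigit():
--             numbers.append(t)
--     return sos + alphabets + special_chars + numbers + eos + pad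
-- ===== Notes on version B (the rewrite author's own statement) =====
-- stated objective: simpler
-- what changed: B sorts the deduplicated non-special tokens once and partitions the single sorted list into the three buckets in one pass (A runs three independent filter-then-sort passes), and B appends '<EOS>'/'<PAD>' at the end as the docstring specifies instead of A's positional slicing of special_tokens.
-- intended difference: On inputs that contain a bucketable non-special token together with '<EOS>' or '<PAD>' but no '<SOS>', A returns the first present special token at the front of the list (its slicing special_tokens[:1] assumes '<SOS>' is present), while B returns '<EOS>'/'<PAD>' at the end, the order A's own docstring ('1. SOS ... 5. EOS 6. PAD') specifies. — e.g. on sort_tokens(["<EOS>", "a"]): A returns ["<EOS>", "a"], B returns ["a", "<EOS>"]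
import Mathlib
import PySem

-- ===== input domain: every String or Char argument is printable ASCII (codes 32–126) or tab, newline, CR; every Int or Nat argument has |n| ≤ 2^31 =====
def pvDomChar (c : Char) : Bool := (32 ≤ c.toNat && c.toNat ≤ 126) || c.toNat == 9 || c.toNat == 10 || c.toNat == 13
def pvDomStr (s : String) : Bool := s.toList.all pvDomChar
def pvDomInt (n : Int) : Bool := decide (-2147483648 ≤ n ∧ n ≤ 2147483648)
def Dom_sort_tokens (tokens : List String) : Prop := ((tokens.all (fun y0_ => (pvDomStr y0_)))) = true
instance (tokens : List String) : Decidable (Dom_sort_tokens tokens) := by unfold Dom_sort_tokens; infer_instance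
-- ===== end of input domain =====

-- B replaces A's three independent filter-then-sort passes by one global sort of the deduplicated
-- non-special tokens followed by a single bucketing pass, and places '<EOS>'/'<PAD>' where the
-- docstring says (simpler decomposition; A's positional slicing misorders them when '<SOS>' is absent).

-- ===== PORT A =====
def sort_tokens (tokens : List String) : List String :=
  let all_tokens := PySem.Set.ofList tokens
  let special_tokens : List String :=
    (if PySem.Set.contains all_tokens "<SOS>" then ["<SOS>"] else []) ++
    (if PySem.Set.contains all_tokens "<EOS>" then ["<EOS>"] else []) ++
    (if PySem.Set.contains all_tokens "<PAD>" then ["<PAD>"] else [])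
  let remaining := all_tokens.filter (fun t => !((["<PAD>", "<SOS>", "<EOS>"] : List String).contains t))
  let alphabets := PySem.List.sorted (remaining.filter (fun t => PySem.Str.strIsalpha t)) (fun x => x) false
  let special_chars := PySem.List.sorted (remaining.filter (fun t => !(PySem.Str.strIsalnum t))) (fun x => x) false
  let numbers := PySem.List.sorted (remaining.filter (fun t => PySem.Str.strIsdigit t)) (fun x => x) false
  PySem.List.slice special_tokens none (some 1) ++ alphabets ++ special_chars ++ numbers ++
    PySem.List.slice special_tokens (some 1) (some 2) ++ PySem.List.slice special_tokens (some 2) none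

-- ===== PORT B =====
def sort_tokens_alt (tokens : List String) : List String :=
  let seen := PySem.Set.ofList tokens
  let sos : List String := if PySem.Set.contains seen "<SOS>" then ["<SOS>"] else []
  let eos : List String := if PySem.Set.contains seen "<EOS>" then ["<EOS>"] else []
  let pad : List String := if PySem.Set.contains seen "<PAD>" then ["<PAD>"] else []
  let rest := PySem.List.sorted
    (PySem.Set.diff seen (PySem.Set.ofList (["<SOS>", "<EOS>", "<PAD>"] : List String))) (fun x => x) false
  let buckets := rest.foldl
    (fun (acc : List String × List String × List String) t =>
      if PySem.Str.strIsalpha t then (acc.1 ++ [t], acc.2.1, acc.2.2)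
      else if !(PySem.Str.strIsalnum t) then (acc.1, acc.2.1 ++ [t], acc.2.2)
      else if PySem.Str.strIsdigit t then (acc.1, acc.2.1, acc.2.2 ++ [t])
      else acc)
    ([], [], [])
  sos ++ buckets.1 ++ buckets.2.1 ++ buckets.2.2 ++ eos ++ pad

-- ===== PRECONDITION & SPEC =====
-- On inputs that contain a bucketable non-special token together with '<EOS>' or '<PAD>' but no
-- '<SOS>', A returns the first present special token at the FRONT of the list (its positional
-- slicing of special_tokens assumes '<SOS>' is present), while B returns '<EOS>'/'<PAD>' at the
-- end, which is the order A's own docstring specifies.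
def D_sort_tokens (tokens : List String) : Prop :=
  "<SOS>" ∉ tokens ∧ ("<EOS>" ∈ tokens ∨ "<PAD>" ∈ tokens) ∧
  ∃ t ∈ tokens, t ∉ (["<SOS>", "<EOS>", "<PAD>"] : List String) ∧
    (PySem.Str.strIsalpha t = true ∨ PySem.Str.strIsalnum t = false ∨ PySem.Str.strIsdigit t = true)
instance (tokens : List String) : Decidable (D_sort_tokens tokens) := by
  unfold D_sort_tokens; infer_instance

def Spec_sort_tokens (tokens : List String) (out : List String) : Prop :=
  ¬ D_sort_tokens tokens → out = sort_tokens_alt tokens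
instance (tokens : List String) (out : List String) : Decidable (Spec_sort_tokens tokens out) := by
  unfold Spec_sort_tokens; infer_instance

def pvDiffWitness_sort_tokens : List String := ["<EOS>", "a"]
def pvDiffWitnessOut_sort_tokens : (List String) × (List String) :=
  (["<EOS>", "a"], ["a", "<EOS>"])

-- ===== CLAIM (what is proved, stated in full; the proofs are below) =====
def Claim_unchanged_sort_tokens : Prop :=
  ∀ (tokens : List String), Dom_sort_tokens tokens → Spec_sort_tokens tokens (sort_tokens tokens)
def Claim_changed_sort_tokens : Prop :=
  Dom_sort_tokens (pvDiffWitness_sort_tokens) ∧ D_sort_tokens (pvDiffWitness_sort_tokens) ∧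
  sort_tokens (pvDiffWitness_sort_tokens) = pvDiffWitnessOut_sort_tokens.1 ∧
  sort_tokens_alt (pvDiffWitness_sort_tokens) = pvDiffWitnessOut_sort_tokens.2 ∧
  pvDiffWitnessOut_sort_tokens.1 ≠ pvDiffWitnessOut_sort_tokens.2
def Claim_exact_sort_tokens : Prop :=
  ∀ (tokens : List String), Dom_sort_tokens tokens → D_sort_tokens tokens →
    sort_tokens tokens ≠ sort_tokens_alt tokens

-- ===== LEMMAS AND PROOFS =====

-- characters: a digit is alphanumeric and not a letter; a letter is alphanumeric
lemma pv_digit_not_alpha (c : Char) (h : PySem.Chars.isdigit c = true) :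
    PySem.Chars.isalpha c = false := by
  simp [PySem.Chars.isdigit, PySem.Chars.isalpha, PySem.Chars.isupper, PySem.Chars.islower,
    Char.le_def, UInt32.le_iff_toNat_le] at *
  omega

lemma pv_str_alpha_alnum (t : String) (h : PySem.Str.strIsalpha t = true) :
    PySem.Str.strIsalnum t = true := by
  simp [PySem.Str.strIsalpha, PySem.Str.strIsalnum, PySem.Chars.strIsalpha,
    PySem.Chars.strIsalnum, List.all_eq_true, PySem.Chars.isalnum] at *
  exact ⟨h.1, fun c hc => Or.inl (h.2 c hc)⟩

lemma pv_str_digit_alnum (t : String) (h : PySem.Str.strIsdigit t = true) :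
    PySem.Str.strIsalnum t = true := by
  simp [PySem.Str.strIsdigit, PySem.Str.strIsalnum, PySem.Chars.strIsdigit,
    PySem.Chars.strIsalnum, List.all_eq_true, PySem.Chars.isalnum] at *
  exact ⟨h.1, fun c hc => Or.inr (h.2 c hc)⟩

lemma pv_str_digit_not_alpha (t : String) (h : PySem.Str.strIsdigit t = true) :
    PySem.Str.strIsalpha t = false := by
  simp [PySem.Str.strIsdigit, PySem.Chars.strIsdigit, List.all_eq_true] at h
  simp [PySem.Str.strIsalpha, PySem.Chars.strIsalpha]
  intro hne
  have hne' : t.toList ≠ [] := by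
    intro hh
    exact hne (by cases t with | _ l => simpa using hh)
  obtain ⟨c, hc⟩ := List.exists_mem_of_ne_nil _ hne'
  exact ⟨c, hc, by simpa using pv_digit_not_alpha c (h.2 c hc)⟩

-- B's single bucketing pass over a list is the three filters of that list
lemma pv_foldl_buckets (l : List String) (a s n : List String) :
    l.foldl
      (fun (acc : List String × List String × List String) t =>
        if PySem.Str.strIsalpha t then (acc.1 ++ [t], acc.2.1, acc.2.2)
        else if !(PySem.Str.strIsalnum t) then (acc.1, acc.2.1 ++ [t], acc.2.2)
        else if PySem.Str.strIsdigit t then (acc.1, acc.2.1, acc.2.2 ++ [t])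
        else acc)
      (a, s, n)
    = (a ++ l.filter (fun t => PySem.Str.strIsalpha t),
       s ++ l.filter (fun t => !(PySem.Str.strIsalnum t)),
       n ++ l.filter (fun t => PySem.Str.strIsdigit t)) := by
  induction l generalizing a s n with
  | nil => simp
  | cons x xs ih =>
    simp only [List.foldl_cons, List.filter_cons]
    by_cases hα : PySem.Str.strIsalpha x = true
    · have hν : PySem.Str.strIsalnum x = true := pv_str_alpha_alnum x hα
      have hδ : PySem.Str.strIsdigit x ≠ true := by
        intro hd
        exact absurd (pv_str_digit_not_alpha x hd) (by simp [show PySem.Chars.strIsalpha x.toList = true from hα])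
      rw [if_pos hα, ih, if_pos hα, if_neg (by simp [show PySem.Chars.strIsalnum x.toList = true from hν]), if_neg hδ]
      simp
    · by_cases hν : PySem.Str.strIsalnum x = true
      · by_cases hδ : PySem.Str.strIsdigit x = true
        · rw [if_neg hα, if_neg (by simp [show PySem.Chars.strIsalnum x.toList = true from hν]), if_pos hδ, ih,
            if_neg hα, if_neg (by simp [show PySem.Chars.strIsalnum x.toList = true from hν]), if_pos hδ]
          simp
        · rw [if_neg hα, if_neg (by simp [show PySem.Chars.strIsalnum x.toList = true from hν]), if_neg hδ, ih,
            if_neg hα, if_neg (by simp [show PySem.Chars.strIsalnum x.toList = true from hν]), if_neg hδ]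
      · have hδ : PySem.Str.strIsdigit x ≠ true := fun hh => hν (pv_str_digit_alnum x hh)
        rw [if_neg hα, if_pos (by simp [show PySem.Chars.strIsalnum x.toList = false from eq_false_of_ne_true hν]), ih,
          if_neg hα, if_pos (by simp [show PySem.Chars.strIsalnum x.toList = false from eq_false_of_ne_true hν]), if_neg hδ]
        simp

-- filtering commutes with sorting a duplicate-free list (the order is then strict)
lemma pv_sorted_filter_comm (l : List String) (hnd : l.Nodup) (p : String → Bool) :
    (PySem.List.sorted l (fun x => x) false).filter p
      = PySem.List.sorted (l.filter p) (fun x => x) false := by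
  apply Eq.symm
  apply PySem.List.sorted_eq_of_perm_of_pairwise_lt
  · exact (PySem.List.sorted_perm l (fun x => x) false).filter p
  · have h1 : (PySem.List.sorted l (fun x => x) false).Pairwise (· ≤ ·) :=
      PySem.List.sorted_pairwise l (fun x => x)
    have h2 : (PySem.List.sorted l (fun x => x) false).Nodup :=
      (PySem.List.sorted_perm l (fun x => x) false).nodup_iff.mpr hnd
    have h3 : (PySem.List.sorted l (fun x => x) false).Pairwise (· < ·) :=
      (h1.and h2).imp (fun h => lt_of_le_of_ne h.1 h.2)
    exact h3.sublist List.filter_sublist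

-- shared pieces of the two normal forms
def pvRem (tokens : List String) : List String :=
  (PySem.Set.ofList tokens).filter (fun t => !((["<PAD>", "<SOS>", "<EOS>"] : List String).contains t))

def pvBuck (tokens : List String) (p : String → Bool) : List String :=
  PySem.List.sorted ((pvRem tokens).filter p) (fun x => x) false

def pvST (tokens : List String) : List String :=
  (if PySem.Set.contains (PySem.Set.ofList tokens) "<SOS>" then ["<SOS>"] else []) ++
  (if PySem.Set.contains (PySem.Set.ofList tokens) "<EOS>" then ["<EOS>"] else []) ++
  (if PySem.Set.contains (PySem.Set.ofList tokens) "<PAD>" then ["<PAD>"] else [])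

lemma pv_slice_take1 (l : List String) :
    PySem.List.slice l none (some 1) = l.take 1 :=
  PySem.List.slice_to l (by norm_num)

lemma pv_slice_mid (l : List String) :
    PySem.List.slice l (some 1) (some 2) = (l.drop 1).take 1 := by
  rw [PySem.List.slice_toNat l (by norm_num) (by norm_num)]
  rfl

lemma pv_slice_drop2 (l : List String) :
    PySem.List.slice l (some 2) none = l.drop 2 :=
  PySem.List.slice_from l (by norm_num)

lemma pv_A_norm (tokens : List String) :
    sort_tokens tokens =
      PySem.List.slice (pvST tokens) none (some 1) ++
      pvBuck tokens (fun t => PySem.Str.strIsalpha t) ++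
      pvBuck tokens (fun t => !(PySem.Str.strIsalnum t)) ++
      pvBuck tokens (fun t => PySem.Str.strIsdigit t) ++
      PySem.List.slice (pvST tokens) (some 1) (some 2) ++
      PySem.List.slice (pvST tokens) (some 2) none := rfl

lemma pv_B_norm (tokens : List String) :
    sort_tokens_alt tokens =
      (if PySem.Set.contains (PySem.Set.ofList tokens) "<SOS>" then ["<SOS>"] else []) ++
      (pvBuck tokens (fun t => PySem.Str.strIsalpha t) ++
       (pvBuck tokens (fun t => !(PySem.Str.strIsalnum t)) ++
        (pvBuck tokens (fun t => PySem.Str.strIsdigit t) ++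
         ((if PySem.Set.contains (PySem.Set.ofList tokens) "<EOS>" then ["<EOS>"] else []) ++
          (if PySem.Set.contains (PySem.Set.ofList tokens) "<PAD>" then ["<PAD>"] else []))))) := by
  have hdiff : PySem.Set.diff (PySem.Set.ofList tokens)
      (PySem.Set.ofList (["<SOS>", "<EOS>", "<PAD>"] : List String)) = pvRem tokens := by
    unfold PySem.Set.diff pvRem
    apply List.filter_congr
    intro t _
    by_cases h1 : t = "<PAD>" <;> by_cases h2 : t = "<SOS>" <;> by_cases h3 : t = "<EOS>" <;>
      simp [h1, h2, h3, PySem.Set.ofList]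
  have hnd : (pvRem tokens).Nodup := (PySem.Set.nodup_ofList tokens).filter _
  simp only [sort_tokens_alt, hdiff, pv_foldl_buckets, List.nil_append]
  unfold pvBuck
  rw [pv_sorted_filter_comm _ hnd, pv_sorted_filter_comm _ hnd, pv_sorted_filter_comm _ hnd]
  simp [List.append_assoc]

-- membership facts
lemma pv_contains_iff (tokens : List String) (x : String) :
    PySem.Set.contains (PySem.Set.ofList tokens) x = true ↔ x ∈ tokens := by
  rw [PySem.Set.contains_iff]
  exact PySem.Set.mem_ofList _ _

lemma pv_mem_rem (tokens : List String) (x : String) (hx : x ∈ pvRem tokens) :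
    x ∈ tokens ∧ x ≠ "<PAD>" ∧ x ≠ "<SOS>" ∧ x ≠ "<EOS>" := by
  unfold pvRem at hx
  rw [List.mem_filter] at hx
  refine ⟨(PySem.Set.mem_ofList _ _).mp hx.1, ?_⟩
  have := hx.2
  simp at this
  tauto

-- when no non-special token is bucketable, every bucket is empty
lemma pv_buckets_nil (tokens : List String)
    (h : ¬ ∃ t ∈ tokens, t ∉ (["<SOS>", "<EOS>", "<PAD>"] : List String) ∧
      (PySem.Str.strIsalpha t = true ∨ PySem.Str.strIsalnum t = false ∨
        PySem.Str.strIsdigit t = true))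
    (p : String → Bool)
    (hp : ∀ t, p t = true → (PySem.Str.strIsalpha t = true ∨ PySem.Str.strIsalnum t = false ∨
      PySem.Str.strIsdigit t = true)) :
    pvBuck tokens p = [] := by
  unfold pvBuck
  rw [PySem.List.sorted_eq_nil_iff, List.filter_eq_nil_iff]
  intro t ht hpt
  obtain ⟨h1, h2, h3, h4⟩ := pv_mem_rem tokens t ht
  exact h ⟨t, h1, by simp [h2, h3, h4], hp t hpt⟩

-- any element of a bucket is a non-special member of tokens
lemma pv_mem_buck (tokens : List String) (p : String → Bool) (x : String)
    (hx : x ∈ pvBuck tokens p) :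
    x ∈ tokens ∧ x ≠ "<PAD>" ∧ x ≠ "<SOS>" ∧ x ≠ "<EOS>" := by
  unfold pvBuck at hx
  rw [PySem.List.mem_sorted, List.mem_filter] at hx
  exact pv_mem_rem tokens x hx.1

-- ===== VERDICT (by name: the statement is the Claim_ definition above) =====
theorem sort_tokens_spec : Claim_unchanged_sort_tokens := by
  intro tokens _ hnD
  rw [pv_A_norm, pv_B_norm]
  by_cases hS : "<SOS>" ∈ tokens
  · -- '<SOS>' present: A's slices land exactly where B puts the specials
    by_cases hE : "<EOS>" ∈ tokens <;> by_cases hP : "<PAD>" ∈ tokens <;>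
      simp [pvST, pv_slice_take1, pv_slice_mid, pv_slice_drop2,
        hS, hE, hP, List.append_assoc]
  · by_cases hEP : ("<EOS>" ∈ tokens ∨ "<PAD>" ∈ tokens)
    · -- '<SOS>' absent but '<EOS>'/'<PAD>' present: outside D_ every bucket is empty
      have hnb : ¬ ∃ t ∈ tokens, t ∉ (["<SOS>", "<EOS>", "<PAD>"] : List String) ∧
          (PySem.Str.strIsalpha t = true ∨ PySem.Str.strIsalnum t = false ∨
            PySem.Str.strIsdigit t = true) := by
        intro hb
        exact hnD ⟨hS, hEP, hb⟩
      rw [pv_buckets_nil tokens hnb _ (fun t h => Or.inl h),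
        pv_buckets_nil tokens hnb _ (fun t h => Or.inr (Or.inl (by simpa using h))),
        pv_buckets_nil tokens hnb _ (fun t h => Or.inr (Or.inr h))]
      by_cases hE : "<EOS>" ∈ tokens <;> by_cases hP : "<PAD>" ∈ tokens
      · simp [pvST, pv_slice_take1, pv_slice_mid, pv_slice_drop2, hS, hE, hP]
      · simp [pvST, pv_slice_take1, pv_slice_mid, pv_slice_drop2, hS, hE, hP]
      · simp [pvST, pv_slice_take1, pv_slice_mid, pv_slice_drop2, hS, hE, hP]
      · exact absurd hEP (by simp [hE, hP])
    · -- no special token at all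
      rw [not_or] at hEP
      simp [pvST, pv_slice_take1, pv_slice_mid, pv_slice_drop2,
        hS, hEP.1, hEP.2]

theorem sort_tokens_changed : Claim_changed_sort_tokens := by
  unfold Claim_changed_sort_tokens; decide

theorem sort_tokens_tight : Claim_exact_sort_tokens := by
  intro tokens _ hD heq
  obtain ⟨hS, hEP, t, ht, htns, htb⟩ := hD
  have hSc : ¬ PySem.Set.contains (PySem.Set.ofList tokens) "<SOS>" = true :=
    fun h => hS ((pv_contains_iff tokens _).mp h)
  -- the witness token t lies in one of the three buckets, so their concatenation is nonempty
  have htR : t ∈ pvRem tokens := by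
    unfold pvRem
    rw [List.mem_filter]
    refine ⟨(PySem.Set.mem_ofList _ _).mpr ht, ?_⟩
    simp at htns ⊢
    tauto
  have hM : (pvBuck tokens (fun t => PySem.Str.strIsalpha t) ++
      (pvBuck tokens (fun t => !(PySem.Str.strIsalnum t)) ++
        pvBuck tokens (fun t => PySem.Str.strIsdigit t))) ≠ [] := by
    have hmem : t ∈ pvBuck tokens (fun t => PySem.Str.strIsalpha t) ++
        (pvBuck tokens (fun t => !(PySem.Str.strIsalnum t)) ++
          pvBuck tokens (fun t => PySem.Str.strIsdigit t)) := by
      simp only [List.mem_append]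
      unfold pvBuck
      rcases htb with hα | hν | hδ
      · exact Or.inl (by rw [PySem.List.mem_sorted, List.mem_filter]; exact ⟨htR, hα⟩)
      · exact Or.inr (Or.inl (by rw [PySem.List.mem_sorted, List.mem_filter]; simp [htR, show PySem.Chars.strIsalnum t.toList = false from hν]))
      · exact Or.inr (Or.inr (by rw [PySem.List.mem_sorted, List.mem_filter]; exact ⟨htR, hδ⟩))
    exact List.ne_nil_of_mem hmem
  obtain ⟨m, M', hMeq⟩ := List.exists_cons_of_ne_nil hM
  have hmmem : m ∈ pvBuck tokens (fun t => PySem.Str.strIsalpha t) ++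
      (pvBuck tokens (fun t => !(PySem.Str.strIsalnum t)) ++
        pvBuck tokens (fun t => PySem.Str.strIsdigit t)) := by rw [hMeq]; simp
  have hmns : m ≠ "<PAD>" ∧ m ≠ "<SOS>" ∧ m ≠ "<EOS>" := by
    simp only [List.mem_append] at hmmem
    rcases hmmem with h | h | h <;> exact (pv_mem_buck tokens _ m h).2
  -- heads: A starts with '<EOS>' or '<PAD>', B starts with the non-special m
  have hB : (sort_tokens_alt tokens).head? = some m := by
    rw [pv_B_norm, if_neg hSc, List.nil_append]
    have : pvBuck tokens (fun t => PySem.Str.strIsalpha t) ++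
        (pvBuck tokens (fun t => !(PySem.Str.strIsalnum t)) ++
          (pvBuck tokens (fun t => PySem.Str.strIsdigit t) ++
            ((if PySem.Set.contains (PySem.Set.ofList tokens) "<EOS>" then ["<EOS>"] else []) ++
             (if PySem.Set.contains (PySem.Set.ofList tokens) "<PAD>" then ["<PAD>"] else []))))
        = (m :: M') ++
            ((if PySem.Set.contains (PySem.Set.ofList tokens) "<EOS>" then ["<EOS>"] else []) ++
             (if PySem.Set.contains (PySem.Set.ofList tokens) "<PAD>" then ["<PAD>"] else [])) := by
      rw [← hMeq]
      simp [List.append_assoc]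
    rw [this]
    simp
  have hA : (sort_tokens tokens).head? = some "<EOS>" ∨
      (sort_tokens tokens).head? = some "<PAD>" := by
    rw [pv_A_norm]
    by_cases hE : "<EOS>" ∈ tokens
    · left
      simp [pvST, pv_slice_take1, hS, hE]
    · right
      have hP : "<PAD>" ∈ tokens := hEP.resolve_left hE
      simp [pvST, pv_slice_take1, hS, hE, hP]
  have hhead := congrArg List.head? heq
  rw [hB] at hhead
  rcases hA with h | h
  · rw [h] at hhead
    exact hmns.2.2 (Option.some.inj hhead).symm
  · rw [h] at hhead
    exact hmns.1 (Option.some.inj hhead).symm
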